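-- pv_equiv track=rewrite | github.com/google-deepmind/conformal_training | sorting_nets.py | parallelize
-- ===== SOURCE A (Python) =====
-- def parallelize(snet_lst):
--   """Organize comparators that can be run in parallel in stages.
--
--   We visit each comparator in the sequence and try to place it
--   to the earliest stage by starting from the last stage constructed.
--
--   Args:
--     snet_lst: List of sorting network stages (that are lists of edges)
--   Returns:
--     stage: Rearanged comparators as stages
--   """
--
--   stage_sets = [set()]
--   stage = [[]]
--   for edge_lst in snet_lst:
--     for edge in edge_lst:
--       placed = False
--       place_here = len(stage)-1
--       for stage_idx in reversed(range(len(stage))):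
--         if ((edge[0] not in stage_sets[stage_idx])
--             and (edge[1] not in stage_sets[stage_idx])):
--           place_here = stage_idx
--           placed = True
--         else:
--           break
--       if not placed:
--         stage.append([edge])
--         stage_sets.append(set(edge))
--       else:
--         stage[place_here].append(edge)
--         stage_sets[place_here].update(edge)
--   return stage
-- ===== SOURCE B (Python) =====
-- def parallelize(snet_lst):
--   """Pack comparators into parallel stages.
--
--   One pass: track for each node the index of the last stage that
--   touches it; an edge goes to stage max(last[a], last[b]) + 1.
--   """
--   last = {}
--   stages = [[]]
--   for edge_lst in snet_lst:
--     for edge in edge_lst: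
--       s = max(last.get(edge[0], -1), last.get(edge[1], -1)) + 1
--       if s == len(stages):
--         stages.append([])
--       stages[s].append(edge)
--       last[edge[0]] = s
--       last[edge[1]] = s
--   return stages
-- ===== Notes on version B (the rewrite author's own statement) =====
-- stated objective: faster
-- what changed: B drops A's per-edge backward scan over all existing stages (and the per-stage membership sets) and instead keeps a dict mapping each node to the last stage index that uses it, placing every edge directly at max(last[a], last[b]) + 1.
import Mathlib
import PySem

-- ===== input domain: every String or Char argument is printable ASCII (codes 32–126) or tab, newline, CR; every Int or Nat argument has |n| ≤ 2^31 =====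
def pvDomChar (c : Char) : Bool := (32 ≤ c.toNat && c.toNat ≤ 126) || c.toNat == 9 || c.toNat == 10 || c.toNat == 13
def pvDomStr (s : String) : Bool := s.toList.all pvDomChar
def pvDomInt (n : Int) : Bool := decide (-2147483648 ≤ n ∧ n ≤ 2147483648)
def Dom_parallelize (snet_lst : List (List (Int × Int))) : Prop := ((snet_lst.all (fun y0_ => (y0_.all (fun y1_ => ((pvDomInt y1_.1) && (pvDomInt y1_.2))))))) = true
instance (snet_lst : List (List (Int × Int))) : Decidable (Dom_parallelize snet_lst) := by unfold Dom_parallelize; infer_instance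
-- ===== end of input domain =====

-- B replaces A's per-edge backward scan over all stages by an O(1) lookup of the
-- last stage index used by each endpoint (dict), an asymptotic speed-up.

-- ===== PORT A =====
-- the inner 'for stage_idx in reversed(range(len(stage)))' loop with break;
-- state is (placed, place_here)
def pvScanA (sets : List (PySem.Set Int)) (a b : Int) :
    List Nat → Bool × Nat → Bool × Nat
  | [], st => st
  | i :: rest, st =>
    if !(PySem.Set.contains (sets.getD i PySem.Set.empty) a)
        && !(PySem.Set.contains (sets.getD i PySem.Set.empty) b) then
      pvScanA sets a b rest (true, i)
    else st

-- body of A's 'for edge in edge_lst' loop; state is (stage_sets, stage)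
def pvStepA (st : List (PySem.Set Int) × List (List (Int × Int))) (edge : Int × Int) :
    List (PySem.Set Int) × List (List (Int × Int)) :=
  let sets := st.1
  let stage := st.2
  let r := pvScanA sets edge.1 edge.2 ((List.range stage.length).reverse)
             (false, stage.length - 1)
  if r.1 = false then
    (sets ++ [PySem.Set.ofList [edge.1, edge.2]], stage ++ [[edge]])
  else
    (sets.set r.2 (PySem.Set.update (sets.getD r.2 PySem.Set.empty) [edge.1, edge.2]),
     stage.set r.2 (stage.getD r.2 [] ++ [edge]))

def parallelize (snet_lst : List (List (Int × Int))) : List (List (Int × Int)) :=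
  (snet_lst.foldl (fun st edge_lst => edge_lst.foldl pvStepA st)
    ([PySem.Set.empty], [[]])).2

-- ===== PORT B =====
-- body of B's inner loop; state is (last, stages)
def pvStepB (st : PySem.Dict Int Int × List (List (Int × Int))) (edge : Int × Int) :
    PySem.Dict Int Int × List (List (Int × Int)) :=
  let last := st.1
  let s : Int := max (last.getD edge.1 (-1)) (last.getD edge.2 (-1)) + 1
  let stages := if s = (st.2.length : Int) then st.2 ++ [[]] else st.2
  ((last.insert edge.1 s).insert edge.2 s,
   stages.set s.toNat (stages.getD s.toNat [] ++ [edge]))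

def parallelize_alt (snet_lst : List (List (Int × Int))) : List (List (Int × Int)) :=
  (snet_lst.foldl (fun st edge_lst => edge_lst.foldl pvStepB st)
    (PySem.Dict.empty, [[]])).2

-- ===== PRECONDITION & SPEC =====
def Spec_parallelize (snet_lst : List (List (Int × Int))) (out : List (List (Int × Int))) : Prop := out = parallelize_alt snet_lst
instance (snet_lst : List (List (Int × Int))) (out : List (List (Int × Int))) : Decidable (Spec_parallelize snet_lst out) := by unfold Spec_parallelize; infer_instance

-- ===== CLAIM (what is proved, stated in full; the proofs are below) =====
def Claim_equal_parallelize : Prop := ∀ (snet_lst : List (List (Int × Int))), Dom_parallelize snet_lst → Spec_parallelize snet_lst (parallelize snet_lst)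

-- ===== LEMMAS AND PROOFS =====

-- greatest index of a stage set containing x, -1 if none
def pvLast : List (PySem.Set Int) → Int → Int
  | [], _ => -1
  | s :: rest, x =>
    if pvLast rest x ≥ 0 then pvLast rest x + 1
    else if x ∈ s then 0 else -1

theorem pvLast_bounds (sets : List (PySem.Set Int)) (x : Int) :
    -1 ≤ pvLast sets x ∧ pvLast sets x < sets.length := by
  induction sets with
  | nil => simp [pvLast]
  | cons s rest ih =>
    obtain ⟨ih1, ih2⟩ := ih
    simp only [pvLast, List.length_cons]
    split_ifs with h1 h2
    · constructor
      · omega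
      · push_cast; omega
    · constructor
      · omega
      · push_cast; omega
    · constructor
      · omega
      · push_cast; omega

theorem le_pvLast_of_mem {sets : List (PySem.Set Int)} {x : Int} {i : Nat}
    (hi : i < sets.length) (hmem : x ∈ sets[i]) : (i : Int) ≤ pvLast sets x := by
  induction sets generalizing i with
  | nil => simp at hi
  | cons s rest ih =>
    cases i with
    | zero =>
      simp only [List.getElem_cons_zero] at hmem
      simp only [pvLast]
      split_ifs with h1
      · omega
      · omega
    | succ j =>
      simp only [List.length_cons, Nat.succ_lt_succ_iff] at hi
      simp only [List.getElem_cons_succ] at hmem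
      have := ih hi hmem
      simp only [pvLast]
      split_ifs with h1 <;> push_cast <;> omega

theorem mem_pvLast {sets : List (PySem.Set Int)} {x : Int}
    (h : 0 ≤ pvLast sets x) :
    ∃ hj : (pvLast sets x).toNat < sets.length, x ∈ sets[(pvLast sets x).toNat] := by
  induction sets with
  | nil => simp [pvLast] at h
  | cons s rest ih =>
    simp only [pvLast] at h ⊢
    split_ifs at h ⊢ with h1 h2
    · obtain ⟨hj, hm⟩ := ih (by omega)
      have ht : (pvLast rest x + 1).toNat = (pvLast rest x).toNat + 1 := by omega
      refine ⟨by simp only [List.length_cons]; omega, ?_⟩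
      simp only [ht, List.getElem_cons_succ]
      exact hm
    · exact ⟨by simp, by simpa using h2⟩
    · omega

theorem pvNoConflict (sets : List (PySem.Set Int)) (x : Int) (j : Nat)
    (hj : j < sets.length) (h : pvLast sets x < (j : Int)) :
    PySem.Set.contains (sets.getD j PySem.Set.empty) x = false := by
  by_contra hc
  simp only [Bool.not_eq_false] at hc
  rw [List.getD_eq_getElem _ _ hj] at hc
  have := le_pvLast_of_mem hj ((PySem.Set.contains_iff _ _).mp hc)
  omega


-- scan characterization
theorem pvScanA_spec (sets : List (PySem.Set Int)) (a b : Int) (k : Nat)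
    (hk : k ≤ sets.length)
    (hm : max (pvLast sets a) (pvLast sets b) + 1 ≤ (k : Int)) (st : Bool × Nat) :
    pvScanA sets a b ((List.range k).reverse) st =
      if max (pvLast sets a) (pvLast sets b) + 1 < (k : Int) then
        (true, (max (pvLast sets a) (pvLast sets b) + 1).toNat)
      else st := by
  set m : Int := max (pvLast sets a) (pvLast sets b) with hmdef
  have hma := pvLast_bounds sets a
  have hmb := pvLast_bounds sets b
  have hmge : -1 ≤ m := by rw [hmdef]; exact le_max_of_le_left hma.1
  have hmlt : m < sets.length := by rw [hmdef]; exact max_lt hma.2 hmb.2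
  induction k generalizing st with
  | zero =>
    rw [if_neg (by push_cast; omega)]
    simp [pvScanA]
  | succ j ih =>
    have hrange : (List.range (j + 1)).reverse = j :: (List.range j).reverse := by
      rw [List.range_succ, List.reverse_append]; rfl
    rw [hrange]
    have hjlen : j < sets.length := by omega
    by_cases hcase : m + 1 ≤ (j : Int)
    · -- no conflict at stage j: the loop moves on to stage j-1
      have hca := pvNoConflict sets a j hjlen (by have := le_max_left (pvLast sets a) (pvLast sets b); omega)
      have hcb := pvNoConflict sets b j hjlen (by have := le_max_right (pvLast sets a) (pvLast sets b); omega)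
      simp only [pvScanA, hca, hcb, Bool.not_false, Bool.and_self, if_pos]
      rw [ih (by omega) (true, j) (by omega)]
      by_cases hlt : m + 1 < (j : Int)
      · rw [if_pos hlt, if_pos (by push_cast; omega)]
      · rw [if_neg hlt, if_pos (by push_cast; omega)]
        congr 1
        omega
    · -- stage j carries one of the endpoints: the loop breaks here
      have hm0 : 0 ≤ m := by omega
      have hmj : m.toNat = j := by omega
      have hconf : (!(PySem.Set.contains (sets.getD j PySem.Set.empty) a)
          && !(PySem.Set.contains (sets.getD j PySem.Set.empty) b)) = false := by
        rcases max_choice (pvLast sets a) (pvLast sets b) with hx | hx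
        · have hxa : m = pvLast sets a := by rw [hmdef, hx]
          obtain ⟨hjj, hmem⟩ := mem_pvLast (x := a) (sets := sets) (by omega)
          have hja : (pvLast sets a).toNat = j := by omega
          have hc : PySem.Set.contains (sets.getD j PySem.Set.empty) a = true := by
            rw [List.getD_eq_getElem _ _ hjlen]
            refine (PySem.Set.contains_iff _ _).mpr ?_
            simp only [hja] at hmem
            exact hmem
          simp only [hc, Bool.not_true, Bool.false_and]
        · have hxb : m = pvLast sets b := by rw [hmdef, hx]
          obtain ⟨hjj, hmem⟩ := mem_pvLast (x := b) (sets := sets) (by omega)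
          have hjb : (pvLast sets b).toNat = j := by omega
          have hc : PySem.Set.contains (sets.getD j PySem.Set.empty) b = true := by
            rw [List.getD_eq_getElem _ _ hjlen]
            refine (PySem.Set.contains_iff _ _).mpr ?_
            simp only [hjb] at hmem
            exact hmem
          simp only [hc, Bool.not_true, Bool.and_false]
      simp only [pvScanA, hconf, Bool.false_eq_true, if_false]
      rw [if_neg (by push_cast; omega)]
theorem pvGetD_append_singleton {α : Type} (l : List α) (y : α) (d : α) :
    (l ++ [y]).getD l.length d = y := by
  simp [List.getD]

theorem pvSet_append_singleton {α : Type} (l : List α) (y z : α) :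
    (l ++ [y]).set l.length z = l ++ [z] := by
  rw [List.set_append_right _ _ (le_refl _)]
  simp

-- relation between the two loop states
def pvRel (sa : List (PySem.Set Int) × List (List (Int × Int)))
    (sb : PySem.Dict Int Int × List (List (Int × Int))) : Prop :=
  sa.2 = sb.2 ∧ sa.1.length = sa.2.length ∧ 1 ≤ sa.2.length ∧
    ∀ x : Int, pvLast sa.1 x = sb.1.getD x (-1)

theorem pvLast_append (sets : List (PySem.Set Int)) (t : PySem.Set Int) (x : Int) :
    pvLast (sets ++ [t]) x = if x ∈ t then (sets.length : Int) else pvLast sets x := by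
  induction sets with
  | nil => simp [pvLast]
  | cons s rest ih =>
    simp only [List.cons_append, pvLast, ih, List.length_cons]
    by_cases hx : x ∈ t
    · simp only [if_pos hx]
      have hpos : ((rest.length : Int)) ≥ 0 := by positivity
      rw [if_pos hpos]
      push_cast; ring
    · simp only [if_neg hx]
theorem pvLast_head_neg {s : PySem.Set Int} {rest : List (PySem.Set Int)} {x : Int}
    (h : pvLast (s :: rest) x < 0) : pvLast rest x < 0 ∧ x ∉ s := by
  simp only [pvLast] at h
  split_ifs at h with h1 h2
  · omega
  · omega
  · exact ⟨by omega, h2⟩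

theorem pvLast_tail_lt {s : PySem.Set Int} {rest : List (PySem.Set Int)} {x : Int} {j : Nat}
    (h : pvLast (s :: rest) x < (j : Int) + 1) : pvLast rest x < (j : Int) := by
  simp only [pvLast] at h
  split_ifs at h with h1 h2
  · omega
  · omega
  · omega

theorem pvLast_set (sets : List (PySem.Set Int)) (a b x : Int) (k : Nat)
    (hk : k < sets.length) (ha : pvLast sets a < (k : Int)) (hb : pvLast sets b < (k : Int)) :
    pvLast (sets.set k (PySem.Set.update (sets.getD k PySem.Set.empty) [a, b])) x =
      if x = a ∨ x = b then (k : Int) else pvLast sets x := by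
  induction sets generalizing k with
  | nil => simp at hk
  | cons s rest ih =>
    cases k with
    | zero =>
      obtain ⟨ha1, ha2⟩ := pvLast_head_neg (by exact_mod_cast ha)
      obtain ⟨hb1, hb2⟩ := pvLast_head_neg (by exact_mod_cast hb)
      simp only [List.set_cons_zero, List.getD_cons_zero, pvLast]
      by_cases hx : x = a ∨ x = b
      · rw [if_pos hx]
        have hxr : pvLast rest x < 0 := by rcases hx with rfl | rfl <;> assumption
        rw [if_neg (by omega), if_pos (by simp; tauto)]
        simp
      · rw [if_neg hx]
        push Not at hx
        have hmem : (x ∈ PySem.Set.update s [a, b]) ↔ x ∈ s := by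
          simp; tauto
        simp only [hmem]
    | succ j =>
      simp only [List.length_cons, Nat.succ_lt_succ_iff] at hk
      have ha' : pvLast rest a < (j : Int) := pvLast_tail_lt (by exact_mod_cast ha)
      have hb' : pvLast rest b < (j : Int) := pvLast_tail_lt (by exact_mod_cast hb)
      have ihj := ih j hk ha' hb'
      simp only [List.set_cons_succ, List.getD_cons_succ, pvLast, ihj]
      by_cases hx : x = a ∨ x = b
      · rw [if_pos hx, if_pos hx, if_pos (by positivity)]
        push_cast; ring
      · simp only [if_neg hx]
theorem pvStep_rel (sa : List (PySem.Set Int) × List (List (Int × Int)))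
    (sb : PySem.Dict Int Int × List (List (Int × Int))) (e : Int × Int)
    (h : pvRel sa sb) : pvRel (pvStepA sa e) (pvStepB sb e) := by
  obtain ⟨sets, stage⟩ := sa
  obtain ⟨last, stages⟩ := sb
  obtain ⟨a, b⟩ := e
  obtain ⟨h1, h2, h3, h4⟩ := h
  simp only at h1 h2 h3 h4
  subst h1
  set m : Int := max (pvLast sets a) (pvLast sets b) with hmdef
  have hma := pvLast_bounds sets a
  have hmb := pvLast_bounds sets b
  have hmge : -1 ≤ m := by rw [hmdef]; exact le_max_of_le_left hma.1
  have hmlt : m < sets.length := by rw [hmdef]; exact max_lt hma.2 hmb.2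
  have hBs : max (last.getD a (-1)) (last.getD b (-1)) + 1 = m + 1 := by
    rw [hmdef, ← h4 a, ← h4 b]
  have hscan := pvScanA_spec sets a b stage.length (by omega) (by omega)
    (false, stage.length - 1)
  simp only [pvStepA, pvStepB, hBs, hscan]
  by_cases hlt : m + 1 < (stage.length : Int)
  · -- the edge fits into an existing stage
    rw [if_pos hlt]
    have hsn : (m + 1).toNat < stage.length := by omega
    have hsn' : (m + 1).toNat < sets.length := by omega
    rw [if_neg (by simp), if_neg (by omega)]
    refine ⟨rfl, by simp [h2], by simp [h3], fun x => ?_⟩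
    dsimp only
    rw [pvLast_set sets a b x ((m+1).toNat) hsn'
      (by have := le_max_left (pvLast sets a) (pvLast sets b); omega)
      (by have := le_max_right (pvLast sets a) (pvLast sets b); omega)]
    by_cases hxb : x = b
    · subst hxb
      rw [PySem.Dict.getD_insert_self]
      rw [if_pos (Or.inr rfl)]
      omega
    · rw [PySem.Dict.getD_insert_of_ne _ _ _ hxb]
      by_cases hxa : x = a
      · subst hxa
        rw [PySem.Dict.getD_insert_self, if_pos (Or.inl rfl)]
        omega
      · rw [PySem.Dict.getD_insert_of_ne _ _ _ hxa, if_neg (by tauto)]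
        exact h4 x
  · -- every existing stage conflicts: a new stage is opened
    have heq : m + 1 = (stage.length : Int) := by omega
    rw [if_neg hlt]
    rw [if_pos heq]
    have htn : (m + 1).toNat = stage.length := by omega
    rw [if_pos rfl]
    rw [htn, pvGetD_append_singleton, pvSet_append_singleton]
    refine ⟨rfl, by simp [h2], by simp, fun x => ?_⟩
    dsimp only
    rw [pvLast_append]
    have hms : x ∈ PySem.Set.ofList [a, b] ↔ (x = a ∨ x = b) := by
      rw [PySem.Set.mem_ofList]; simp
    by_cases hxb : x = b
    · subst hxb
      rw [if_pos (hms.mpr (Or.inr rfl)), PySem.Dict.getD_insert_self]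
      omega
    · rw [PySem.Dict.getD_insert_of_ne _ _ _ hxb]
      by_cases hxa : x = a
      · subst hxa
        rw [if_pos (hms.mpr (Or.inl rfl)), PySem.Dict.getD_insert_self]
        omega
      · rw [if_neg (by rw [hms]; tauto), PySem.Dict.getD_insert_of_ne _ _ _ hxa]
        exact h4 x

theorem pvFoldInner (el : List (Int × Int)) :
    ∀ sa sb, pvRel sa sb → pvRel (el.foldl pvStepA sa) (el.foldl pvStepB sb) := by
  induction el with
  | nil => intro sa sb h; exact h
  | cons e rest ih => intro sa sb h; exact ih _ _ (pvStep_rel _ _ _ h)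

theorem pvFoldOuter (l : List (List (Int × Int))) :
    ∀ sa sb, pvRel sa sb →
      pvRel (l.foldl (fun st edge_lst => edge_lst.foldl pvStepA st) sa)
            (l.foldl (fun st edge_lst => edge_lst.foldl pvStepB st) sb) := by
  induction l with
  | nil => intro sa sb h; exact h
  | cons el rest ih => intro sa sb h; exact ih _ _ (pvFoldInner el _ _ h)

theorem pvFold_rel (snet_lst : List (List (Int × Int))) :
    pvRel (snet_lst.foldl (fun st edge_lst => edge_lst.foldl pvStepA st)
            ([PySem.Set.empty], [[]]))
          (snet_lst.foldl (fun st edge_lst => edge_lst.foldl pvStepB st)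
            (PySem.Dict.empty, [[]])) := by
  have init : pvRel ([PySem.Set.empty], [[]]) (PySem.Dict.empty, [[]]) := by
    refine ⟨rfl, rfl, by simp, fun x => ?_⟩
    simp [pvLast, PySem.Set.empty, PySem.Dict.getD, PySem.Dict.get?, PySem.Dict.empty]
  exact pvFoldOuter snet_lst _ _ init

-- ===== VERDICT (by name: the statement is the Claim_ definition above) =====
theorem parallelize_spec : Claim_equal_parallelize := by
  intro snet_lst _
  unfold Spec_parallelize parallelize parallelize_alt
  exact (pvFold_rel snet_lst).1
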